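-- pv_equiv track=rewrite | github.com/wigginsjbah/AI-Software-Engineering-Capstone-Project | database/migration_handler.py | _sort_tables_by_dependency
-- ===== SOURCE A (Python) =====
-- from typing import Dict, List, Any, Optional
--
-- def _sort_tables_by_dependency(sample_data: Dict[str, List[Dict]]) -> List[str]:
--     """Sort tables by dependency to avoid foreign key issues"""
--
--     # Simple heuristic: tables with '_id' columns come after their referenced tables
--     independent_tables = []
--     dependent_tables = []
--
--     for table_name, records in sample_data.items():
--         if records:
--             has_foreign_keys = any(
--                 col.endswith('_id') and col != 'id'
--                 for col in records[0].keys()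
--             )
--
--             if has_foreign_keys:
--                 dependent_tables.append(table_name)
--             else:
--                 independent_tables.append(table_name)
--
--     return independent_tables + dependent_tables
-- ===== SOURCE B (Python) =====
-- def _sort_tables_by_dependency(sample_data):
--     """Sort tables by dependency to avoid foreign key issues"""
--
--     def has_fk(record):
--         return any(col.endswith('_id') and col != 'id' for col in record.keys())
--
--     candidates = [(name, recs) for name, recs in sample_data.items() if recs]
--     ordered = sorted(candidates, key=lambda pair: has_fk(pair[1][0]))
--     return [name for name, _ in ordered]
-- ===== Notes on version B (the rewrite author's own statement) =====
-- stated objective: alternative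
-- what changed: Replaces the two-accumulator partition loop and list concatenation with a filter of non-empty tables followed by a stable sort on a boolean foreign-key flag, relying on sort stability to keep insertion order within each group.
import Mathlib
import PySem

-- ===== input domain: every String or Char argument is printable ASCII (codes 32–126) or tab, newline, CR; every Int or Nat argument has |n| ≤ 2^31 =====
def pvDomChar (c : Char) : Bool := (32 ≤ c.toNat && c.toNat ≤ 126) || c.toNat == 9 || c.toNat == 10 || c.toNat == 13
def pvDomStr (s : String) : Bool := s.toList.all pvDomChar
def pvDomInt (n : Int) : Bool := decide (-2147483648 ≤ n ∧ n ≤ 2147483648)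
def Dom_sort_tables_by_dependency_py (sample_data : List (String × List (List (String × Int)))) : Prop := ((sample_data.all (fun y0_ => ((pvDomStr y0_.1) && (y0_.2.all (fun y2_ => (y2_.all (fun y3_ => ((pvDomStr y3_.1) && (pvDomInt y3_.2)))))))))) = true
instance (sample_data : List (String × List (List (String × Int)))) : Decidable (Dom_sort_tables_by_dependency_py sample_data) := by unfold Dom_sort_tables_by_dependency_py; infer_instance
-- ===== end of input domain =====

-- B replaces A's two-accumulator partition loop by filter-then-stable-sort on a boolean
-- foreign-key flag (objective: alternative decomposition of the same cost).

-- ===== PORT A =====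
-- two accumulator lists, one pass, concatenated at the end (literal transliteration of A)
def sort_tables_by_dependency_py (sample_data : List (String × List (List (String × Int)))) : List String :=
  let acc := sample_data.foldl
    (fun (acc : List String × List String) entry =>
      match entry.2 with
      | [] => acc                      -- 'if records:' fails, entry skipped
      | r0 :: _ =>
        -- has_foreign_keys = any(col.endswith('_id') and col != 'id' for col in records[0].keys())
        if r0.any (fun kv => PySem.Str.endswith kv.1 "_id" && !(kv.1 == "id")) then
          (acc.1, acc.2 ++ [entry.1])
        else
          (acc.1 ++ [entry.1], acc.2))
    ([], [])
  acc.1 ++ acc.2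

-- ===== PORT B =====
-- has_fk(record): any(col.endswith('_id') and col != 'id' for col in record.keys())
def pvHasFK (record : List (String × Int)) : Bool :=
  record.any (fun kv => PySem.Str.endswith kv.1 "_id" && !(kv.1 == "id"))

-- filter non-empty tables, then stable sort by the boolean FK flag of the first record
def sort_tables_by_dependency_py_alt (sample_data : List (String × List (List (String × Int)))) : List String :=
  let candidates := sample_data.filter (fun p => !p.2.isEmpty)
  let ordered := PySem.List.sorted candidates
    (fun pair => pvHasFK (PySem.List.pyGetD pair.2 0 [])) false
  ordered.map (fun p => p.1)

-- ===== PRECONDITION & SPEC =====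
def Spec_sort_tables_by_dependency_py (sample_data : List (String × List (List (String × Int)))) (out : List String) : Prop := out = sort_tables_by_dependency_py_alt sample_data
instance (sample_data : List (String × List (List (String × Int)))) (out : List String) : Decidable (Spec_sort_tables_by_dependency_py sample_data out) := by unfold Spec_sort_tables_by_dependency_py; infer_instance

-- ===== CLAIM (what is proved, stated in full; the proofs are below) =====
def Claim_equal_sort_tables_by_dependency_py : Prop := ∀ (sample_data : List (String × List (List (String × Int)))), Dom_sort_tables_by_dependency_py sample_data → Spec_sort_tables_by_dependency_py sample_data (sort_tables_by_dependency_py sample_data)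

-- ===== LEMMAS AND PROOFS =====

-- the "independent" / "dependent" selection predicates, used only by the proofs
def pvIndep (p : String × List (List (String × Int))) : Bool :=
  match p.2 with
  | [] => false
  | r0 :: _ => !pvHasFK r0

def pvDep (p : String × List (List (String × Int))) : Bool :=
  match p.2 with
  | [] => false
  | r0 :: _ => pvHasFK r0

-- inserting behind everything when the new element goes after each existing one
lemma pvInsertBy_all_false {α : Type} (before : α → α → Bool) (x : α) :
    ∀ L : List α, (∀ y ∈ L, before x y = false) →
      PySem.List.insertBy before x L = L ++ [x] := by
  intro L
  induction L with
  | nil => intro _; rfl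
  | cons y ys ih =>
    intro h
    simp [PySem.List.insertBy, h y (List.mem_cons_self)]
    exact ih (fun z hz => h z (List.mem_cons_of_mem _ hz))

-- inserting just before the first element the new one must precede
lemma pvInsertBy_split {α : Type} (before : α → α → Bool) (x t : α) (ts : List α) :
    ∀ F : List α, (∀ y ∈ F, before x y = false) → before x t = true →
      PySem.List.insertBy before x (F ++ t :: ts) = F ++ x :: t :: ts := by
  intro F
  induction F with
  | nil => intro _ ht; simp [PySem.List.insertBy, ht]
  | cons f fs ih =>
    intro h ht
    simp [PySem.List.insertBy, h f (List.mem_cons_self)]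
    exact ih (fun z hz => h z (List.mem_cons_of_mem _ hz)) ht

-- the stable insertion-sort loop with a Bool key partitions: falses keep order before trues
lemma pvSortedBool_fold {α : Type} (key : α → Bool) :
    ∀ (xs F T : List α), (∀ y ∈ F, key y = false) → (∀ y ∈ T, key y = true) →
      xs.foldl (fun acc x => PySem.List.insertBy (fun a b => decide (key a < key b)) x acc) (F ++ T)
        = (F ++ xs.filter (fun x => !key x)) ++ (T ++ xs.filter (fun x => key x)) := by
  intro xs
  induction xs with
  | nil => intro F T _ _; simp
  | cons x xs ih =>
    intro F T hF hT
    simp only [List.foldl_cons]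
    by_cases hk : key x = true
    · have hall : ∀ y ∈ F ++ T, decide (key x < key y) = false := by
        intro y _; rw [hk]; cases key y <;> decide
      rw [pvInsertBy_all_false _ x (F ++ T) hall, List.append_assoc]
      rw [ih F (T ++ [x]) hF (by
        intro y hy
        rcases List.mem_append.mp hy with h | h
        · exact hT y h
        · simp only [List.mem_singleton] at h; subst h; exact hk)]
      simp [hk]
    · have hkf : key x = false := by simpa using hk
      have hF' : ∀ y ∈ F, decide (key x < key y) = false := by
        intro y hy; rw [hkf, hF y hy]; decide
      have hFx : ∀ y ∈ F ++ [x], key y = false := by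
        intro y hy
        rcases List.mem_append.mp hy with h | h
        · exact hF y h
        · simp only [List.mem_singleton] at h; subst h; exact hkf
      cases T with
      | nil =>
        rw [List.append_nil, pvInsertBy_all_false _ x F hF']
        have h := ih (F ++ [x]) [] hFx (by simp)
        rw [List.append_nil] at h
        rw [h]
        simp [hkf]
      | cons t ts =>
        have ht : decide (key x < key t) = true := by
          rw [hkf, hT t (List.mem_cons_self)]; decide
        rw [pvInsertBy_split _ x t ts F hF' ht]
        have h := ih (F ++ [x]) (t :: ts) hFx hT
        rw [List.append_assoc] at h
        simp only [List.singleton_append] at h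
        rw [h]
        simp [hkf]

-- A's loop builds exactly the two filters, appended to the starting accumulators
lemma pvA_fold :
    ∀ (xs : List (String × List (List (String × Int)))) (I D : List String),
      xs.foldl
        (fun (acc : List String × List String) entry =>
          match entry.2 with
          | [] => acc
          | r0 :: _ =>
            if r0.any (fun kv => PySem.Str.endswith kv.1 "_id" && !(kv.1 == "id")) then
              (acc.1, acc.2 ++ [entry.1])
            else
              (acc.1 ++ [entry.1], acc.2)) (I, D)
        = (I ++ (xs.filter pvIndep).map (fun p => p.1),
           D ++ (xs.filter pvDep).map (fun p => p.1)) := by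
  intro xs
  induction xs with
  | nil => intro I D; simp
  | cons p ps ih =>
    intro I D
    rcases p with ⟨name, recs⟩
    cases recs with
    | nil =>
      simp only [List.foldl_cons]
      rw [ih]
      simp [pvIndep, pvDep]
    | cons r0 rs =>
      simp only [List.foldl_cons]
      cases hb : r0.any (fun kv => PySem.Str.endswith kv.1 "_id" && !(kv.1 == "id")) with
      | true =>
        have hred : (if (true : Bool) = true then (I, D ++ [name]) else (I ++ [name], D))
            = (I, D ++ [name]) := by simp
        rw [hred, ih]
        have hfk : pvHasFK r0 = true := hb
        simp [pvIndep, pvDep, hfk]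
      | false =>
        have hred : (if (false : Bool) = true then (I, D ++ [name]) else (I ++ [name], D))
            = (I ++ [name], D) := by simp
        rw [hred, ih]
        have hfk : pvHasFK r0 = false := hb
        simp [pvIndep, pvDep, hfk]

-- B's composed (merged) filters coincide with A's selection predicates
lemma pvFilter_indep (xs : List (String × List (List (String × Int)))) :
    xs.filter (fun a => !pvHasFK (PySem.List.pyGetD a.2 0 []) && !a.2.isEmpty)
      = xs.filter pvIndep := by
  induction xs with
  | nil => rfl
  | cons p ps ih =>
    rcases p with ⟨name, recs⟩
    cases recs with
    | nil => simp [pvIndep, ih]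
    | cons r0 rs => simp [List.filter_cons, pvIndep, ih]

lemma pvFilter_dep (xs : List (String × List (List (String × Int)))) :
    xs.filter (fun a => pvHasFK (PySem.List.pyGetD a.2 0 []) && !a.2.isEmpty)
      = xs.filter pvDep := by
  induction xs with
  | nil => rfl
  | cons p ps ih =>
    rcases p with ⟨name, recs⟩
    cases recs with
    | nil => simp [pvDep, ih]
    | cons r0 rs => simp [List.filter_cons, pvDep, ih]

-- ===== VERDICT (by name: the statement is the Claim_ definition above) =====
theorem sort_tables_by_dependency_py_spec : Claim_equal_sort_tables_by_dependency_py := by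
  intro xs _
  unfold Spec_sort_tables_by_dependency_py
  unfold sort_tables_by_dependency_py sort_tables_by_dependency_py_alt
  simp only [PySem.List.sorted, if_neg (by decide : ¬ (false = true))]
  rw [show ([] : List (String × List (List (String × Int)))) =
        ([] ++ [] : List (String × List (List (String × Int)))) from rfl]
  rw [pvSortedBool_fold (fun pair => pvHasFK (PySem.List.pyGetD pair.2 0 []))
        (xs.filter (fun p => !p.2.isEmpty)) [] [] (by simp) (by simp)]
  rw [pvA_fold xs [] []]
  simp only [List.nil_append, List.filter_filter, List.map_append]
  rw [pvFilter_indep, pvFilter_dep]
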